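-- pv_equiv track=rewrite | github.com/sujan-sai-g/Systematic-Weakness-Detection | src/sliceline/core.py | _get_sublevels
-- ===== SOURCE A (Python) =====
-- from typing import List, Tuple, Union, Dict, Any
-- import itertools
--
-- def _get_sublevels(items: int, length: int) -> List[List[int]]:
--     """
--     Recursively generate sign assignments for slicing dimensions.
--
--     Args:
--         items (int): Number of dimensions that should be non-zero.
--         length (int): Total number of remaining dimensions.
--
--     Returns:
--         List[List[int]]: List of sign assignments.
--     """
--     if items > length:
--         raise ValueError(
--             "Number of non-zero items cannot exceed the total length."
--         )
--
--     # Special case: no non-zero entries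
--     if items == 0:
--         return [[0] * length]
--
--     results = []
--     # Choose positions where non-zero values will be placed.
--     for positions in itertools.combinations(range(length), items):
--         # For each chosen combination, assign either +1 or -1.
--         for signs in itertools.product([1, -1], repeat=items):
--             row = [0] * length
--             for pos, sign in zip(positions, signs):
--                 row[pos] = sign
--             results.append(row)
--     return results
-- ===== SOURCE B (Python) =====
-- from typing import List
--
--
-- def _blocks(k: int, n: int) -> List[List[List[int]]]:
--     """Blocks of length-n sign rows with exactly k non-zeros: one block per
--     position-set, blocks in lexicographic position order, rows inside a block
--     in (+1 before -1) product order. p is the first non-zero position."""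
--     if k == 0:
--         return [[[0] * n]]
--     return [[[0] * p + [s] + row for s in (1, -1) for row in blk]
--             for p in range(n - k + 1)
--             for blk in _blocks(k - 1, n - p - 1)]
--
--
-- def _get_sublevels(items: int, length: int) -> List[List[int]]:
--     if items > length:
--         raise ValueError(
--             "Number of non-zero items cannot exceed the total length."
--         )
--     return [row for block in _blocks(items, length) for row in block]
-- ===== Notes on version B (the rewrite author's own statement) =====
-- stated objective: alternative
-- what changed: Replaces the itertools.combinations x itertools.product double loop with write-by-index row building by a single structural recursion on the length that decides per position whether it is non-zero and prepends the sign directly, producing blocks that flatten to exactly A's order.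
import Mathlib
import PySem

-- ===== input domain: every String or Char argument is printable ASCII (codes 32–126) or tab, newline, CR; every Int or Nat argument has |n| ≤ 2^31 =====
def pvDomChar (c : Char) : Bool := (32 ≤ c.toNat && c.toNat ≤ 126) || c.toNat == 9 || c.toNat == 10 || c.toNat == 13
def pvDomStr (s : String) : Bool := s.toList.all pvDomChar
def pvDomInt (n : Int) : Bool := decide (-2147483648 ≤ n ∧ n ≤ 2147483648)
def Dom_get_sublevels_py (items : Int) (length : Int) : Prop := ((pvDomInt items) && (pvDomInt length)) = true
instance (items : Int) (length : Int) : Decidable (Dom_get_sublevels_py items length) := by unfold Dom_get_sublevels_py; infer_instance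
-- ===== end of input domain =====

-- B replaces A's combinations×product double loop (rows written by index) with a
-- recursion on the number of non-zero items over the first non-zero position
-- ('alternative', same cost); identical output order.

-- ===== PORT A =====
-- itertools.combinations(xs, r) in lexicographic order (r is items.toNat; Pre_ gives items ≥ 0)
def pyCombinations (xs : List Int) (r : Nat) : List (List Int) :=
  match r, xs with
  | 0, _ => [[]]
  | _ + 1, [] => []
  | r + 1, x :: rest => (pyCombinations rest r).map (x :: ·) ++ pyCombinations rest (r + 1)

-- itertools.product([1, -1], repeat=r)
def pyProductSigns (r : Nat) : List (List Int) :=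
  match r with
  | 0 => [[]]
  | r + 1 => ([1, -1] : List Int).flatMap (fun s => (pyProductSigns r).map (s :: ·))

-- row = [0]*length; for pos, sign in zip(positions, signs): row[pos] = sign
-- (positions come from range(length), so pos.toNat is Python-exact here)
def pyBuildRow (n : Nat) (positions signs : List Int) : List Int :=
  (positions.zip signs).foldl (fun row ps => row.set ps.1.toNat ps.2) (List.replicate n 0)

def get_sublevels_py (items : Int) (length : Int) : List (List Int) :=
  if items = 0 then [List.replicate length.toNat 0]
  else
    (pyCombinations (PySem.List.pyRange 0 length 1) items.toNat).flatMap
      (fun positions =>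
        (pyProductSigns items.toNat).map (fun signs => pyBuildRow length.toNat positions signs))

-- ===== PORT B =====
-- _blocks(k, n): rows grouped one block per position-set; recursion on k (the
-- number of non-zero items, a Nat here since Pre_ gives items ≥ 0), p = first
-- non-zero position; Python's comprehension order (p outer, sub-block inner,
-- signs +1 before -1) is kept
def pyBlocksK (k : Nat) (n : Int) : List (List (List Int)) :=
  match k with
  | 0 => [[List.replicate n.toNat 0]]
  | k + 1 =>
    (PySem.List.pyRange 0 (n - ((k : Int) + 1) + 1) 1).flatMap (fun p =>
      (pyBlocksK k (n - p - 1)).map (fun blk =>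
        ([1, -1] : List Int).flatMap (fun s =>
          blk.map (fun row => List.replicate p.toNat 0 ++ s :: row))))

def get_sublevels_py_alt (items : Int) (length : Int) : List (List Int) :=
  (pyBlocksK items.toNat length).flatMap (fun block => block)

-- ===== PRECONDITION & SPEC =====
-- Pre_ excludes exactly the inputs where A raises ValueError: items > length (explicit raise)
-- and items < 0 (itertools.combinations rejects a negative r).
def Pre_get_sublevels_py (items : Int) (length : Int) : Prop := 0 ≤ items ∧ items ≤ length
instance (items : Int) (length : Int) : Decidable (Pre_get_sublevels_py items length) := by
  unfold Pre_get_sublevels_py; infer_instance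

def pvWitness_get_sublevels_py : Int × Int := (2, 3)

def Spec_get_sublevels_py (items : Int) (length : Int) (out : List (List Int)) : Prop :=
  out = get_sublevels_py_alt items length
instance (items : Int) (length : Int) (out : List (List Int)) :
    Decidable (Spec_get_sublevels_py items length out) := by
  unfold Spec_get_sublevels_py; infer_instance

-- ===== CLAIM (what is proved, stated in full; the proofs are below) =====
def Claim_equal_get_sublevels_py : Prop :=
  ∀ (items : Int) (length : Int), Dom_get_sublevels_py items length →
    Pre_get_sublevels_py items length →
    Spec_get_sublevels_py items length (get_sublevels_py items length)

-- ===== LEMMAS AND PROOFS =====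

lemma comb_nil_of_lt : ∀ (xs : List Int) (r : Nat), xs.length < r → pyCombinations xs r = [] := by
  intro xs
  induction xs with
  | nil => intro r h; cases r with | zero => omega | succ r => rfl
  | cons x rest ih =>
    intro r h
    cases r with
    | zero => simp at h
    | succ r =>
      simp at h
      simp [pyCombinations, ih r (by omega), ih (r+1) (by omega)]

lemma comb_map (f : Int → Int) : ∀ (xs : List Int) (r : Nat),
    pyCombinations (xs.map f) r = (pyCombinations xs r).map (List.map f) := by
  intro xs
  induction xs with
  | nil => intro r; cases r <;> simp [pyCombinations]
  | cons x rest ih =>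
    intro r
    cases r with
    | zero => simp [pyCombinations]
    | succ r =>
      simp only [List.map_cons, pyCombinations, ih r, ih (r + 1), List.map_append,
        List.map_map]
      simp [Function.comp]

lemma comb_mem : ∀ (xs : List Int) (r : Nat) (ps : List Int),
    ps ∈ pyCombinations xs r → ∀ a ∈ ps, a ∈ xs := by
  intro xs
  induction xs with
  | nil =>
    intro r ps h
    cases r with
    | zero => simp [pyCombinations] at h; subst h; simp
    | succ r => simp [pyCombinations] at h
  | cons x rest ih =>
    intro r ps h a ha
    cases r with
    | zero => simp [pyCombinations] at h; subst h; simp at ha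
    | succ r =>
      simp only [pyCombinations, List.mem_append, List.mem_map] at h
      rcases h with ⟨qs, hqs, rfl⟩ | h
      · rcases List.mem_cons.mp ha with rfl | ha
        · exact List.mem_cons_self
        · exact List.mem_cons_of_mem _ (ih r qs hqs a ha)
      · exact List.mem_cons_of_mem _ (ih (r + 1) ps h a ha)

-- a fold over positions shifted past a fixed front only touches the tail of the row
lemma build_fold_shift (c : Int) (hc : 0 ≤ c) : ∀ (qs ss : List Int) (front l : List Int),
    front.length = c.toNat → (∀ q ∈ qs, 0 ≤ q) →
    (((qs.map (· + c)).zip ss).foldl (fun row ps => row.set ps.1.toNat ps.2) (front ++ l)) =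
      front ++ ((qs.zip ss).foldl (fun row ps => row.set ps.1.toNat ps.2) l) := by
  intro qs
  induction qs with
  | nil => intro ss front l _ _; simp
  | cons q qs ih =>
    intro ss front l hf hq
    cases ss with
    | nil => simp
    | cons s ss =>
      have h0 : (0:Int) ≤ q := hq q (by simp)
      have ht : (q + c).toNat = front.length + q.toNat := by omega
      simp only [List.map_cons, List.zip_cons_cons, List.foldl_cons, ht]
      rw [show (front ++ l).set (front.length + q.toNat) s = front ++ l.set q.toNat s by simp]
      exact ih ss front (l.set q.toNat s) hf (fun x hx => hq x (by simp [hx]))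

lemma range_add (a b : Int) :
    PySem.List.pyRange a b 1 = (PySem.List.pyRange 0 (b - a) 1).map (· + a) := by
  rw [PySem.List.pyRange_one, PySem.List.pyRange_one, List.map_map]
  simp [Function.comp]
  intro x _; ring

-- combinations of a range, split on the first chosen position
lemma comb_range_first (k : Nat) : ∀ (d : Nat) (a b : Int), (b - a).toNat ≤ d →
    pyCombinations (PySem.List.pyRange a b 1) (k + 1) =
      (PySem.List.pyRange a (b - (k : Int)) 1).flatMap
        (fun p => (pyCombinations (PySem.List.pyRange (p + 1) b 1) k).map (p :: ·)) := by
  intro d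
  induction d with
  | zero =>
    intro a b hd
    rw [PySem.List.pyRange_one_eq_nil (by omega), PySem.List.pyRange_one_eq_nil (by omega)]
    simp [pyCombinations]
  | succ d ih =>
    intro a b hd
    by_cases hab : b - (k : Int) ≤ a
    · rw [PySem.List.pyRange_one_eq_nil hab]
      rw [comb_nil_of_lt _ (k+1) (by rw [PySem.List.length_pyRange_one]; omega)]
      simp
    · have hk : a < b - (k : Int) := by omega
      have hab' : a < b := by omega
      rw [PySem.List.pyRange_one_cons hab', PySem.List.pyRange_one_cons hk]
      show (pyCombinations (PySem.List.pyRange (a+1) b 1) k).map (a :: ·)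
          ++ pyCombinations (PySem.List.pyRange (a+1) b 1) (k + 1) = _
      rw [List.flatMap_cons, ih (a+1) b (by omega)]

lemma replicate_split (n p : Int) (h0 : 0 ≤ p) (h1 : p < n) :
    List.replicate n.toNat (0:Int) =
      List.replicate p.toNat 0 ++ 0 :: List.replicate (n - p - 1).toNat 0 := by
  rw [show (0:Int) :: List.replicate (n - p - 1).toNat 0 = List.replicate ((n-p-1).toNat + 1) 0 from rfl]
  rw [← List.replicate_add]
  congr 1
  omega

-- A's zip-assignment row for the combination {p} ∪ (qs shifted past p) is B's
-- zeros-prefix ++ sign ++ sub-row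
lemma buildRow_first (n p s : Int) (qs ss : List Int) (h0 : 0 ≤ p) (h1 : p < n)
    (hq : ∀ q ∈ qs, 0 ≤ q) :
    pyBuildRow n.toNat (p :: qs.map (· + (p + 1))) (s :: ss) =
      List.replicate p.toNat 0 ++ s :: pyBuildRow (n - p - 1).toNat qs ss := by
  simp only [pyBuildRow, List.zip_cons_cons, List.foldl_cons]
  rw [replicate_split n p h0 h1]
  have hset : (List.replicate p.toNat (0:Int) ++ 0 :: List.replicate (n-p-1).toNat 0).set p.toNat s
      = List.replicate p.toNat 0 ++ s :: List.replicate (n-p-1).toNat 0 := by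
    have hlen : p.toNat = (List.replicate p.toNat (0:Int)).length + 0 := by simp
    rw [hlen]; simp
  rw [hset]
  rw [show List.replicate p.toNat (0:Int) ++ s :: List.replicate (n-p-1).toNat 0
      = (List.replicate p.toNat (0:Int) ++ [s]) ++ List.replicate (n-p-1).toNat 0 by simp]
  rw [build_fold_shift (p+1) (by omega) qs ss _ _ (by simp; omega) hq]
  simp

-- the heart of the proof: B's blocks are exactly A's per-combination row groups
lemma blocksK_main : ∀ (k : Nat) (n : Int), (k : Int) ≤ n →
    pyBlocksK k n =
      (pyCombinations (PySem.List.pyRange 0 n 1) k).map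
        (fun ps => (pyProductSigns k).map (fun ss => pyBuildRow n.toNat ps ss)) := by
  intro k
  induction k with
  | zero =>
    intro n hn
    simp [pyBlocksK, pyCombinations, pyProductSigns, pyBuildRow]
  | succ k ih =>
    intro n hn
    rw [show pyBlocksK (k+1) n = (PySem.List.pyRange 0 (n - ((k : Int) + 1) + 1) 1).flatMap (fun p =>
      (pyBlocksK k (n - p - 1)).map (fun blk =>
        ([1, -1] : List Int).flatMap (fun s =>
          blk.map (fun row => List.replicate p.toNat 0 ++ s :: row)))) from rfl]
    rw [comb_range_first k (n - 0).toNat 0 n (le_refl _)]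
    rw [show n - ((k : Int) + 1) + 1 = n - (k : Int) by ring]
    rw [List.map_flatMap]
    apply List.flatMap_congr
    intro p hp
    rw [PySem.List.mem_pyRange_one] at hp
    have hp0 : 0 ≤ p := hp.1
    have hpn : p < n - (k : Int) := hp.2
    -- rewrite A-side combinations over the shifted range
    rw [range_add (p+1) n, comb_map]
    rw [ih (n - p - 1) (by omega), List.map_map, List.map_map]
    have hsub : n - (p + 1) = n - p - 1 := by ring
    rw [hsub, List.map_map]
    apply List.map_congr_left
    intro qs hqs
    have hq : ∀ q ∈ qs, 0 ≤ q := by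
      intro q hmemq
      have := comb_mem _ _ _ hqs q hmemq
      rw [PySem.List.mem_pyRange_one] at this
      exact this.1
    simp only [Function.comp]
    show ([1, -1] : List Int).flatMap (fun s =>
        ((pyProductSigns k).map (fun ss => pyBuildRow (n - p - 1).toNat qs ss)).map
          (fun row => List.replicate p.toNat 0 ++ s :: row))
      = (pyProductSigns (k+1)).map (fun ss => pyBuildRow n.toNat (p :: qs.map (· + (p+1))) ss)
    rw [show pyProductSigns (k+1)
        = ([1, -1] : List Int).flatMap (fun s => (pyProductSigns k).map (s :: ·)) from rfl]
    rw [List.map_flatMap]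
    congr 1
    funext s
    rw [List.map_map, List.map_map]
    apply List.map_congr_left
    intro ss _
    simp only [Function.comp]
    exact (buildRow_first n p s qs ss hp0 (by omega) hq).symm

-- ===== VERDICT (by name: the statement is the Claim_ definition above) =====
theorem get_sublevels_py_spec : Claim_equal_get_sublevels_py := by
  intro items length _ hpre
  obtain ⟨h0, h1⟩ := hpre
  unfold Spec_get_sublevels_py
  obtain ⟨k, rfl⟩ : ∃ k : Nat, items = (k : Int) := ⟨items.toNat, by omega⟩
  have hkn : (k : Int) ≤ length := h1
  unfold get_sublevels_py get_sublevels_py_alt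
  rw [Int.toNat_natCast, blocksK_main k length hkn]
  by_cases hk : (k : Int) = 0
  · obtain rfl : k = 0 := by exact_mod_cast hk
    rw [if_pos (by norm_num : ((0:Nat) : Int) = 0)]
    simp [pyCombinations, pyProductSigns, pyBuildRow]
  · rw [if_neg hk]
    rw [List.flatMap_map]
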